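-- pv_equiv track=rewrite | github.com/YAPP-18th/Study_Algorithm_Team_1 | week8/NaLDo627/disguise.py | solution
-- ===== SOURCE A (Python) =====
-- def solution(clothes):
--     answer = 1
--     closet = {}
--     for cloth in clothes:
--         item, typ = cloth
--         count = closet.get(typ, 0)
--         closet[typ] = count + 1
--
--     for key in closet.keys():
--         answer *= closet[key] + 1
--     answer -= 1
--
--     return answer
-- ===== SOURCE B (Python) =====
-- def solution(clothes):
--     types = sorted(t for _, t in clothes)
--
--     def prod_runs(ts):
--         if not ts:
--             return 1
--         head = ts[0]
--         k = 1
--         while k < len(ts) and ts[k] == head: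
--             k += 1
--         return (k + 1) * prod_runs(ts[k:])
--
--     return prod_runs(types) - 1
-- ===== Notes on version B (the rewrite author's own statement) =====
-- stated objective: alternative
-- what changed: Replaces A's dict frequency table (count per type, then multiply over keys) by sorting the type list and recursively multiplying (run_length + 1) over consecutive equal-type runs.
import Mathlib
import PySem

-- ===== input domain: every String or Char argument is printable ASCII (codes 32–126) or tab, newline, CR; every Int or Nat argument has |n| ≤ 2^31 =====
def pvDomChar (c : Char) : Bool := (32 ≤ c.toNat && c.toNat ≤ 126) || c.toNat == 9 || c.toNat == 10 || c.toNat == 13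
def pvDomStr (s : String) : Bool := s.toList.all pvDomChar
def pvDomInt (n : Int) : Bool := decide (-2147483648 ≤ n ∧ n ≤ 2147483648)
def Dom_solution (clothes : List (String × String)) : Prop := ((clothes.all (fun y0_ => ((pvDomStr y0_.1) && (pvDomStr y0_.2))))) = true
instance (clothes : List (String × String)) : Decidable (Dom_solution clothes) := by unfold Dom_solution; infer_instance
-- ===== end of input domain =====

-- B changes the strategy, not the result: sort the types and multiply (run+1) over equal runs
-- instead of A's dict frequency table; same cost class, alternative decomposition.

-- ===== PORT A =====
-- literal transliteration: build the counting dict, then multiply (count+1) over its keys.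
-- closet[key] inside the second loop always finds the key (it iterates closet.keys()),
-- so getD 0 is exact there.
def solution (clothes : List (String × String)) : Int :=
  let closet : PySem.Dict String Int :=
    clothes.foldl (fun d cloth => d.insert cloth.2 (d.getD cloth.2 0 + 1)) PySem.Dict.empty
  let answer : Int :=
    closet.keys.foldl (fun answer key => answer * (closet.getD key 0 + 1)) 1
  answer - 1

-- ===== PORT B =====
-- prod_runs from Source B: strip the run of the head element, multiply by (run length + 1), recurse.
def prodRuns : List String → Int
  | [] => 1
  | t :: rest =>
      let run := rest.takeWhile (fun x => x == t)
      let tail := rest.dropWhile (fun x => x == t)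
      ((run.length : Int) + 2) * prodRuns tail
termination_by l => l.length
decreasing_by
  simpa using Nat.lt_succ_of_le (List.length_dropWhile_le _ _)

def solution_alt (clothes : List (String × String)) : Int :=
  prodRuns (PySem.List.sorted (clothes.map Prod.snd) (fun x => x) false) - 1

-- ===== PRECONDITION & SPEC =====
def Spec_solution (clothes : List (String × String)) (out : Int) : Prop := out = solution_alt clothes
instance (clothes : List (String × String)) (out : Int) : Decidable (Spec_solution clothes out) := by unfold Spec_solution; infer_instance

-- ===== CLAIM (what is proved, stated in full; the proofs are below) =====
def Claim_equal_solution : Prop := ∀ (clothes : List (String × String)), Dom_solution clothes → Spec_solution clothes (solution clothes)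

-- ===== LEMMAS AND PROOFS =====

theorem foldl_mul_eq_prod (f : String → Int) (l : List String) (a : Int) :
    l.foldl (fun acc k => acc * f k) a = a * (l.map f).prod := by
  induction l generalizing a with
  | nil => simp
  | cons x xs ih => simp [List.foldl_cons, ih, mul_assoc]

-- A's value is the product of (count t + 1) over the distinct types (first-occurrence order).
theorem solution_eq_prod (clothes : List (String × String)) :
    solution clothes =
      ((PySem.Set.ofList (clothes.map Prod.snd)).map
        (fun t => ((clothes.map Prod.snd).count t : Int) + 1)).prod - 1 := by
  have hfold :
      clothes.foldl (fun d cloth => d.insert cloth.2 (d.getD cloth.2 0 + 1))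
        (PySem.Dict.empty : PySem.Dict String Int)
        = PySem.Dict.counter (clothes.map Prod.snd) := by
    rw [← PySem.Dict.foldl_insert_getD_add_one_eq_counter, List.foldl_map]
  unfold solution
  simp only [hfold, PySem.Dict.keys_counter, foldl_mul_eq_prod, one_mul]
  congr 1
  exact congrArg List.prod (List.map_congr_left
    (fun t _ => by rw [PySem.Dict.getD_counter]))

-- helper: in a nondecreasing list whose elements are all ≥ t, dropping the equal-to-t
-- prefix drops ALL occurrences of t.
theorem not_mem_dropWhile_eq (t : String) (l : List String)
    (hpw : l.Pairwise (· ≤ ·)) (hge : ∀ x ∈ l, t ≤ x) :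
    t ∉ l.dropWhile (fun x => x == t) := by
  intro hmem
  rcases e : l.dropWhile (fun x => x == t) with _ | ⟨h, tl⟩
  · rw [e] at hmem; exact absurd hmem List.not_mem_nil
  · have hsub : (h :: tl).Sublist l := by rw [← e]; exact List.dropWhile_sublist _
    have hne : ¬ (h == t) = true := by
      have := List.head?_dropWhile_not (fun x => x == t) l
      rw [e] at this; simpa using this
    have hne' : h ≠ t := fun hh => hne (by simp [hh])
    have hth : t ≤ h := hge h (hsub.mem List.mem_cons_self)
    rw [e] at hmem
    rcases List.mem_cons.mp hmem with rfl | hm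
    · exact hne' rfl
    · have hpw' : (h :: tl).Pairwise (· ≤ ·) := hpw.sublist hsub
      have hht : h ≤ t := (List.pairwise_cons.mp hpw').1 t hm
      exact hne' (le_antisymm hht hth)

-- B: on a ≤-sorted list, prodRuns is the product of (count t + 1) over some nodup list
-- of exactly the members.
theorem prodRuns_eq_prod :
    ∀ n (ts : List String), ts.length ≤ n → ts.Pairwise (· ≤ ·) →
      ∃ L : List String, L.Nodup ∧ (∀ x, x ∈ L ↔ x ∈ ts) ∧
        prodRuns ts = (L.map (fun t => (ts.count t : Int) + 1)).prod := by
  intro n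
  induction n with
  | zero =>
    intro ts h _
    have : ts = [] := List.eq_nil_of_length_eq_zero (Nat.le_zero.mp h)
    exact ⟨[], by simp [this, prodRuns]⟩
  | succ n ih =>
    intro ts hlen hpw
    match ts with
    | [] => exact ⟨[], by simp [prodRuns]⟩
    | t :: rest =>
      set run := rest.takeWhile (fun x => x == t) with hrun
      set tail := rest.dropWhile (fun x => x == t) with htail
      have hsplit : run ++ tail = rest := List.takeWhile_append_dropWhile
      have hrun_eq : ∀ x ∈ run, x = t := by
        intro x hx
        have := List.mem_takeWhile_imp hx
        simpa using this
      have hpw_rest : rest.Pairwise (· ≤ ·) := hpw.of_cons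
      have ht_le : ∀ x ∈ rest, t ≤ x := (List.pairwise_cons.mp hpw).1
      have hsub : tail.Sublist rest := by rw [htail]; exact List.dropWhile_sublist _
      have hpw_tail : tail.Pairwise (· ≤ ·) := hpw_rest.sublist hsub
      have ht_notin : t ∉ tail := by
        rw [htail]; exact not_mem_dropWhile_eq t rest hpw_rest ht_le
      have htail_len : tail.length ≤ n := by
        have h1 : tail.length ≤ rest.length := hsub.length_le
        have h2 : rest.length ≤ n := Nat.lt_succ_iff.mp (by simpa using hlen)
        exact le_trans h1 h2
      obtain ⟨L', hnd, hmemL, hprod⟩ := ih tail htail_len hpw_tail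
      refine ⟨t :: L', ?_, ?_, ?_⟩
      · exact List.nodup_cons.mpr ⟨fun h => ht_notin ((hmemL t).mp h), hnd⟩
      · intro x
        simp only [List.mem_cons, hmemL]
        constructor
        · rintro (rfl | hx)
          · exact Or.inl rfl
          · exact Or.inr (hsub.mem hx)
        · rintro (rfl | hx)
          · exact Or.inl rfl
          · rcases (by rw [← hsplit] at hx; exact List.mem_append.mp hx) with hr | ht'
            · exact Or.inl (hrun_eq x hr)
            · exact Or.inr ht'
      · have hstep : prodRuns (t :: rest) = ((run.length : Int) + 2) * prodRuns tail := by
          rw [prodRuns]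
        have hcount_t : ((t :: rest).count t : Int) = (run.length : Int) + 1 := by
          have hrun_count : run.count t = run.length :=
            List.count_eq_length.mpr (fun x hx => by simp [hrun_eq x hx])
          have : (t :: rest).count t = 1 + run.length := by
            rw [List.count_cons_self, ← hsplit, List.count_append,
              List.count_eq_zero_of_not_mem ht_notin, hrun_count]
            omega
          rw [this]; push_cast; ring
        have hcount_s : ∀ s ∈ L', ((t :: rest).count s : Int) = (tail.count s : Int) := by
          intro s hs
          have hst : s ≠ t := fun e => ht_notin ((hmemL t).mp (e ▸ hs))
          have : (t :: rest).count s = tail.count s := by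
            rw [List.count_cons_of_ne hst.symm, ← hsplit, List.count_append,
              List.count_eq_zero_of_not_mem (fun hm => hst (hrun_eq s hm))]
            omega
          rw [this]
        rw [hstep, hprod]
        simp only [List.map_cons, List.prod_cons, hcount_t]
        have : L'.map (fun u => ((t :: rest).count u : Int) + 1)
             = L'.map (fun u => (tail.count u : Int) + 1) :=
          List.map_congr_left (fun u hu => by rw [hcount_s u hu])
        rw [this]; ring

-- ===== VERDICT (by name: the statement is the Claim_ definition above) =====
theorem solution_spec : Claim_equal_solution := by
  intro clothes _
  unfold Spec_solution
  set types := clothes.map Prod.snd with htypes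
  set ts := PySem.List.sorted types (fun x => x) false with hts
  have hperm : ts.Perm types := PySem.List.sorted_perm _ _ _
  have hpw : ts.Pairwise (· ≤ ·) := by
    simpa using PySem.List.sorted_pairwise (xs := types) (key := fun x => x)
  obtain ⟨L, hnd, hmem, hprod⟩ := prodRuns_eq_prod ts.length ts le_rfl hpw
  rw [solution_eq_prod]
  unfold solution_alt
  rw [← hts, hprod]
  congr 1
  -- both are products over nodup lists with the same members, of the same function
  have hLperm : (PySem.Set.ofList types).Perm L := by
    rw [List.perm_ext_iff_of_nodup (PySem.Set.nodup_ofList _) hnd]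
    intro a
    rw [PySem.Set.mem_ofList, hmem, hperm.mem_iff]
  have hfun : L.map (fun t => (ts.count t : Int) + 1)
            = L.map (fun t => (types.count t : Int) + 1) :=
    List.map_congr_left (fun u _ => by rw [hperm.count_eq])
  rw [hfun]
  exact (hLperm.map _).prod_eq
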